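-- pv_equiv track=rewrite | github.com/rlacombe/distillate | distillate/obsidian.py | _parse_frontmatter_blocks
-- ===== SOURCE A (Python) =====
-- from collections import OrderedDict
-- from typing import Any, Dict, List, Optional, Union
--
-- def _parse_frontmatter_blocks(fm_text: str) -> OrderedDict:
--     """Parse frontmatter text into ordered blocks keyed by field name.
--
--     Each value is the full text of that block (key line + any continuation lines
--     like list items). Preserves original formatting for untouched fields.
--     """
--     blocks: OrderedDict[str, str] = OrderedDict()
--     current_key: Optional[str] = None
--     current_lines: list = []
--
--     for line in fm_text.split("\n"):
--         # Top-level key: starts with a non-whitespace char and contains ":"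
--         if line and not line[0].isspace() and ":" in line:
--             if current_key is not None:
--                 blocks[current_key] = "\n".join(current_lines)
--             current_key = line.split(":", 1)[0]
--             current_lines = [line]
--         else:
--             current_lines.append(line)
--
--     if current_key is not None:
--         blocks[current_key] = "\n".join(current_lines)
--
--     return blocks
-- ===== SOURCE B (Python) =====
-- from collections import OrderedDict
--
--
-- def _parse_frontmatter_blocks(fm_text: str) -> OrderedDict:
--     """Parse frontmatter text into ordered blocks keyed by field name.
--
--     Segment-cutting version: drop the non-key prefix, then repeatedly cut one
--     key-led segment (key line plus its continuation lines) off the front.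
--     """
--     def is_key(line: str) -> bool:
--         return bool(line) and not line[0].isspace() and ":" in line
--
--     lines = fm_text.split("\n")
--     # Phase 1: lines before the first top-level key are never part of a block.
--     start = 0
--     while start < len(lines) and not is_key(lines[start]):
--         start += 1
--     lines = lines[start:]
--     # Phase 2: cut one segment per top-level key.
--     blocks: OrderedDict = OrderedDict()
--     while lines:
--         j = 1
--         while j < len(lines) and not is_key(lines[j]):
--             j += 1
--         blocks[lines[0].split(":", 1)[0]] = "\n".join(lines[:j])
--         lines = lines[j:]
--     return blocks
-- ===== Notes on version B (the rewrite author's own statement) =====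
-- stated objective: alternative
-- what changed: Replaces A's single-pass state machine (current_key/current_lines accumulators flushed on each new key) with a two-phase segment cutter: drop the non-key prefix, then repeatedly scan ahead to the next key line and slice one whole block off the front.
import Mathlib
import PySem

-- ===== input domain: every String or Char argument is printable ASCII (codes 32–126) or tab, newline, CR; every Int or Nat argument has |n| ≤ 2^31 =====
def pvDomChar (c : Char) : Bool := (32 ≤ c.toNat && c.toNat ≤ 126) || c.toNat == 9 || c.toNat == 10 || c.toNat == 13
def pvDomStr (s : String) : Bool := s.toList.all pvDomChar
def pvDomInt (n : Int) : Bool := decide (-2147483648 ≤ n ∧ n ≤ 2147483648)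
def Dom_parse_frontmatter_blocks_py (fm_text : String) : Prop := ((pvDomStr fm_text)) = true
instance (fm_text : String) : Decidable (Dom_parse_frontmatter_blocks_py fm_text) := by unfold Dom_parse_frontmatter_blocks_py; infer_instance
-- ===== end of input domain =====

-- B re-implements the same parse as segment cutting (drop non-key prefix, then slice one
-- key-led block at a time) instead of A's single-pass accumulator state machine; same results.

-- `line and not line[0].isspace() and ":" in line` (identical test in both Pythons)
def pvIsKey (l : String) : Bool :=
  match l.toList with
  | [] => false
  | c :: _ => !PySem.Chars.isspace c && PySem.Str.isIn ":" l

-- `line.split(":", 1)[0]` (identical expression in both Pythons)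
def pvKeyOf (l : String) : String :=
  (((PySem.Str.splitMax? l ":" 1).getD []).headD "")

-- ===== PORT A =====
-- loop body of A: state = (blocks, current_key, current_lines)
def pvAStep (st : PySem.Dict String String × Option String × List String) (line : String) :
    PySem.Dict String String × Option String × List String :=
  if pvIsKey line then
    (match st.2.1 with
     | some k => st.1.insert k (PySem.Str.join "\n" st.2.2)
     | none => st.1,
     some (pvKeyOf line), [line])
  else
    (st.1, st.2.1, st.2.2 ++ [line])

-- the final `if current_key is not None: blocks[current_key] = ...`
def pvAFinish (st : PySem.Dict String String × Option String × List String) :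
    PySem.Dict String String :=
  match st.2.1 with
  | some k => st.1.insert k (PySem.Str.join "\n" st.2.2)
  | none => st.1

def parse_frontmatter_blocks_py (fm_text : String) : List (String × String) :=
  (pvAFinish (((PySem.Str.split? fm_text "\n").getD []).foldl pvAStep
      (PySem.Dict.empty, none, []))).items

-- ===== PORT B =====
-- Phase 2 of B: cut one key-led segment (head line + following non-key lines) per step.
def pvBGo (lines : List String) (blocks : PySem.Dict String String) :
    PySem.Dict String String :=
  match lines with
  | [] => blocks
  | l :: rest =>
      pvBGo (rest.dropWhile (fun x => !pvIsKey x))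
        (blocks.insert (pvKeyOf l)
          (PySem.Str.join "\n" (l :: rest.takeWhile (fun x => !pvIsKey x))))
termination_by lines.length
decreasing_by
  exact Nat.lt_succ_of_le (List.length_dropWhile_le _ _)

def parse_frontmatter_blocks_py_alt (fm_text : String) : List (String × String) :=
  (pvBGo (((PySem.Str.split? fm_text "\n").getD []).dropWhile (fun x => !pvIsKey x))
      PySem.Dict.empty).items

-- ===== PRECONDITION & SPEC =====
def Spec_parse_frontmatter_blocks_py (fm_text : String) (out : List (String × String)) : Prop := out = parse_frontmatter_blocks_py_alt fm_text
instance (fm_text : String) (out : List (String × String)) : Decidable (Spec_parse_frontmatter_blocks_py fm_text out) := by unfold Spec_parse_frontmatter_blocks_py; infer_instance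

-- ===== CLAIM (what is proved, stated in full; the proofs are below) =====
def Claim_equal_parse_frontmatter_blocks_py : Prop := ∀ (fm_text : String), Dom_parse_frontmatter_blocks_py fm_text → Spec_parse_frontmatter_blocks_py fm_text (parse_frontmatter_blocks_py fm_text)

-- ===== LEMMAS AND PROOFS =====

-- A's fold from an active-key state equals B's recursion with the pending block extended
-- by the upcoming non-key lines.
lemma pvA_foldl_some (rest : List String) :
    ∀ (blocks : PySem.Dict String String) (k : String) (cl : List String),
    pvAFinish (rest.foldl pvAStep (blocks, some k, cl)) =
      pvBGo (rest.dropWhile (fun x => !pvIsKey x))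
        (blocks.insert k (PySem.Str.join "\n" (cl ++ rest.takeWhile (fun x => !pvIsKey x)))) := by
  induction rest with
  | nil =>
      intro blocks k cl
      simp [pvAFinish, pvBGo]
  | cons l t ih =>
      intro blocks k cl
      by_cases h : pvIsKey l = true
      · simp [pvAStep, h, ih, pvBGo]
      · simp only [Bool.not_eq_true] at h
        simp [pvAStep, h, ih]

-- A's fold from the initial no-key state equals B's recursion after dropping the non-key prefix.
lemma pvA_foldl_none (lines : List String) :
    ∀ (blocks : PySem.Dict String String) (cl : List String),
    pvAFinish (lines.foldl pvAStep (blocks, none, cl)) =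
      pvBGo (lines.dropWhile (fun x => !pvIsKey x)) blocks := by
  induction lines with
  | nil =>
      intro blocks cl
      simp [pvAFinish, pvBGo]
  | cons l t ih =>
      intro blocks cl
      by_cases h : pvIsKey l = true
      · simp [pvAStep, h, pvBGo, pvA_foldl_some]
      · simp only [Bool.not_eq_true] at h
        simp [pvAStep, h, ih]

-- ===== VERDICT (by name: the statement is the Claim_ definition above) =====
theorem parse_frontmatter_blocks_py_spec : Claim_equal_parse_frontmatter_blocks_py := by
  intro fm_text _
  unfold Spec_parse_frontmatter_blocks_py parse_frontmatter_blocks_py parse_frontmatter_blocks_py_alt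
  rw [pvA_foldl_none]
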